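-- pv_equiv track=rewrite | github.com/edcrfv458/programmers | 프로그래머스/0/181859. 배열 만들기 6/배열 만들기 6.py | solution
-- ===== SOURCE A (Python) =====
-- def solution(arr):
--     stk = []
--     i = 0
--     while i < len(arr):
--         if len(stk) == 0:
--             stk.append(arr[i])
--             i += 1
--         elif len(stk) > 0 and arr[i] == stk[-1]:
--             stk.pop()
--             i += 1
--         elif len(stk) > 0 and arr[i] != stk[-1]:
--             stk.append(arr[i])
--             i += 1
--     return stk if len(stk) else [-1]
-- ===== SOURCE B (Python) =====
-- def solution(arr):
--     cur = list(arr)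
--     while True:
--         nxt = []
--         i = 0
--         n = len(cur)
--         while i < n:
--             if i + 1 < n and cur[i] == cur[i + 1]:
--                 i += 2  # drop this adjacent equal pair
--             else:
--                 nxt.append(cur[i])
--                 i += 1
--         if nxt == cur:
--             break
--         cur = nxt
--     return cur if cur else [-1]
-- ===== Notes on version B (the rewrite author's own statement) =====
-- stated objective: alternative
-- what changed: Replaces the single-pass stack (pop on match, else push) with a repeated full-pass fixpoint that drops non-overlapping adjacent equal pairs left to right until a pass removes nothing; it also does not mutate its working data via stack operations.
import Mathlib
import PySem

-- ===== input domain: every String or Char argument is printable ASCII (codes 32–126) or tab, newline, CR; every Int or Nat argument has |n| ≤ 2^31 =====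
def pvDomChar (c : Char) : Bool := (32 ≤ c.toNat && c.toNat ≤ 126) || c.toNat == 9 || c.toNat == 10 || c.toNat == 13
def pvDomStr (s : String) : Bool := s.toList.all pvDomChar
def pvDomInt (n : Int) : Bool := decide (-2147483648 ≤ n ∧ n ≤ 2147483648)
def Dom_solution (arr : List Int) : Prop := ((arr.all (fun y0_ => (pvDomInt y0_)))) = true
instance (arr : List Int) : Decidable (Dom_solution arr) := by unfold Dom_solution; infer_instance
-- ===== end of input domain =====

-- B replaces A's single-pass stack with a repeated pair-removal pass iterated to a fixpoint
-- (alternative decomposition, not faster); the input list is not mutated by either version.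

-- ===== PORT A =====
-- the while loop advances i by one each iteration, so it is a fold over arr with state stk
def solutionLoop (stk : List Int) (xs : List Int) : List Int :=
  match xs with
  | [] => stk
  | x :: rest =>
    if stk.length = 0 then solutionLoop (stk ++ [x]) rest
    else if stk.length > 0 ∧ stk.getLast? = some x then solutionLoop stk.dropLast rest
    -- the final Python `elif len(stk) > 0 and arr[i] != stk[-1]` guard is exhaustive here
    else solutionLoop (stk ++ [x]) rest

def solution (arr : List Int) : List Int :=
  let stk := solutionLoop [] arr
  if stk.length ≠ 0 then stk else [-1]

-- ===== PORT B =====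
-- one left-to-right pass: drop non-overlapping adjacent equal pairs (the inner while of Source B)
def onePass (xs : List Int) : List Int :=
  match xs with
  | [] => []
  | [x] => [x]
  | x :: y :: r => if x = y then onePass r else x :: onePass (y :: r)

theorem onePass_length_le (xs : List Int) : (onePass xs).length ≤ xs.length := by
  induction xs using onePass.induct with
  | case1 => simp [onePass]
  | case2 => simp [onePass]
  | case3 y r ih => simp only [onePass, if_pos rfl]; simp; omega
  | case4 x y r h ih => simp only [onePass, if_neg h]; simpa using ih

theorem onePass_lt (xs : List Int) (h : onePass xs ≠ xs) :
    (onePass xs).length < xs.length := by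
  induction xs using onePass.induct with
  | case1 => simp [onePass] at h
  | case2 => simp [onePass] at h
  | case3 y r ih =>
    simp only [onePass, if_pos rfl]
    have := onePass_length_le r
    simp; omega
  | case4 x y r hxy ih =>
    simp only [onePass, if_neg hxy] at h ⊢
    have h' : onePass (y :: r) ≠ y :: r := by
      intro he; exact h (by rw [he])
    have := ih h'
    simpa using this

-- the outer while of Source B: repeat the pass until it removes nothing
def reduceFix (xs : List Int) : List Int :=
  if onePass xs = xs then xs else reduceFix (onePass xs)
termination_by xs.length
decreasing_by exact onePass_lt xs (by assumption)

def solution_alt (arr : List Int) : List Int :=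
  let r := reduceFix arr
  if r = [] then [-1] else r

-- ===== PRECONDITION & SPEC =====
def Spec_solution (arr : List Int) (out : List Int) : Prop := out = solution_alt arr
instance (arr : List Int) (out : List Int) : Decidable (Spec_solution arr out) := by unfold Spec_solution; infer_instance

-- ===== CLAIM (what is proved, stated in full; the proofs are below) =====
def Claim_equal_solution : Prop := ∀ (arr : List Int), Dom_solution arr → Spec_solution arr (solution arr)

-- ===== LEMMAS AND PROOFS =====

-- A's step on a front-first (reversed) stack
def stepF (t : List Int) (x : Int) : List Int :=
  match t with
  | [] => [x]
  | y :: ys => if x = y then ys else x :: y :: ys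

-- "reduced": no two adjacent equal elements
def Red (t : List Int) : Prop := List.IsChain (· ≠ ·) t

theorem red_nil : Red ([] : List Int) := List.isChain_nil

theorem stepF_red {t : List Int} (x : Int) (h : Red t) : Red (stepF t x) := by
  match t with
  | [] => simp [stepF, Red]
  | y :: ys =>
    by_cases hxy : x = y
    · simpa [stepF, hxy, Red] using h.tail
    · simp only [stepF, if_neg hxy, Red]
      match ys with
      | [] => simpa [List.isChain_cons_cons] using hxy
      | z :: zs => exact List.isChain_cons_cons.mpr ⟨hxy, h⟩

theorem stepF_cancel {t : List Int} (x : Int) (h : Red t) :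
    stepF (stepF t x) x = t := by
  match t with
  | [] => simp [stepF]
  | y :: ys =>
    by_cases hxy : x = y
    · subst hxy
      match ys with
      | [] => simp [stepF]
      | z :: zs =>
        have hxz : x ≠ z := (List.isChain_cons_cons.mp h).1
        simp [stepF, hxz]
    · simp [stepF, hxy]

theorem bridge (xs : List Int) : ∀ stk : List Int,
    solutionLoop stk xs = (List.foldl stepF stk.reverse xs).reverse := by
  induction xs with
  | nil => intro stk; simp [solutionLoop]
  | cons x rest ih =>
    intro stk
    rcases h : stk.reverse with _ | ⟨y, ys⟩
    · have hstk : stk = [] := by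
        have := congrArg List.reverse h; simpa using this
      subst hstk
      simp only [solutionLoop, List.length_nil, if_pos rfl]
      rw [ih]
      simp [stepF]
    · have hstk : stk = ys.reverse ++ [y] := by
        have := congrArg List.reverse h; simpa using this
      subst hstk
      have hlen : (ys.reverse ++ [y]).length ≠ 0 := by simp
      by_cases hxy : x = y
      · subst hxy
        have hlast : (ys.reverse ++ [x]).getLast? = some x := by
          simp [List.getLast?_concat]
        simp only [solutionLoop]
        rw [if_neg hlen, if_pos ⟨by simpa using Nat.pos_of_ne_zero hlen, hlast⟩]
        rw [ih]
        simp [h, stepF]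
      · have hlast : ¬ ((ys.reverse ++ [y]).getLast? = some x) := by
          simp [List.getLast?_concat]; exact fun he => hxy he.symm
        simp only [solutionLoop]
        rw [if_neg hlen, if_neg (by rintro ⟨-, hc⟩; exact hlast hc)]
        rw [ih]
        simp [h, stepF, hxy]

theorem onePass_invariant (xs : List Int) : ∀ t : List Int, Red t →
    List.foldl stepF t (onePass xs) = List.foldl stepF t xs := by
  induction xs using onePass.induct with
  | case1 => intro t _; simp [onePass]
  | case2 => intro t _; simp [onePass]
  | case3 y r ih =>
    intro t ht
    rw [show onePass (y :: y :: r) = onePass r from by simp [onePass]]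
    rw [ih t ht]
    simp only [List.foldl_cons]
    rw [stepF_cancel y ht]
  | case4 x y r hxy ih =>
    intro t ht
    simp only [onePass, if_neg hxy, List.foldl_cons]
    exact ih (stepF t x) (stepF_red x ht)

theorem onePass_fix_red (r : List Int) (h : onePass r = r) : Red r := by
  induction r using onePass.induct with
  | case1 => exact List.isChain_nil
  | case2 => simp [Red]
  | case3 y r ih =>
    exfalso
    rw [show onePass (y :: y :: r) = onePass r from by simp [onePass]] at h
    have := onePass_length_le r
    have := congrArg List.length h
    simp at this; omega
  | case4 x y r hxy ih =>
    rw [show onePass (x :: y :: r) = x :: onePass (y :: r) from by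
      simp [onePass, hxy]] at h
    have h2 : onePass (y :: r) = y :: r := by
      injection h
    exact List.isChain_cons_cons.mpr ⟨hxy, ih h2⟩

theorem reduceFix_fix (xs : List Int) : onePass (reduceFix xs) = reduceFix xs := by
  induction xs using reduceFix.induct with
  | case1 xs h => rw [reduceFix, if_pos h]; exact h
  | case2 xs h ih => rw [reduceFix, if_neg h]; exact ih

theorem reduceFix_red (xs : List Int) : Red (reduceFix xs) :=
  onePass_fix_red _ (reduceFix_fix xs)

theorem reduceFix_invariant (xs : List Int) :
    List.foldl stepF [] (reduceFix xs) = List.foldl stepF [] xs := by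
  induction xs using reduceFix.induct with
  | case1 xs h => rw [reduceFix, if_pos h]
  | case2 xs h ih =>
    rw [reduceFix, if_neg h, ih]
    exact onePass_invariant xs [] red_nil

theorem foldl_of_red (r : List Int) : ∀ t : List Int, Red (r.reverse ++ t) →
    List.foldl stepF t r = r.reverse ++ t := by
  induction r with
  | nil => intro t _; simp
  | cons y r' ih =>
    intro t hred
    have hred' : Red (r'.reverse ++ (y :: t)) := by
      simpa using hred
    have hstep : stepF t y = y :: t := by
      match t with
      | [] => simp [stepF]
      | z :: zs =>
        have hy : y ≠ z := by
          have hc : List.IsChain (· ≠ ·) (y :: z :: zs) :=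
            ((List.isChain_append.mp hred').2).1
          exact (List.isChain_cons_cons.mp hc).1
        simp [stepF, hy]
    simp only [List.foldl_cons, hstep]
    rw [ih (y :: t) hred']
    simp

theorem red_reverse {r : List Int} (h : Red r) : Red r.reverse := by
  unfold Red at *
  rw [List.isChain_reverse]
  exact h.imp (fun _ _ hab => Ne.symm hab)

theorem stack_eq_fix (arr : List Int) : solutionLoop [] arr = reduceFix arr := by
  rw [bridge arr []]
  simp only [List.reverse_nil]
  rw [← reduceFix_invariant arr]
  rw [show List.foldl stepF [] (reduceFix arr)
        = (reduceFix arr).reverse ++ [] from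
    foldl_of_red (reduceFix arr) [] (by simpa using red_reverse (reduceFix_red arr))]
  simp

-- ===== VERDICT (by name: the statement is the Claim_ definition above) =====
theorem solution_spec : Claim_equal_solution := by
  intro arr _
  unfold Spec_solution solution solution_alt
  rw [stack_eq_fix arr]
  rcases h : reduceFix arr with _ | ⟨z, zs⟩ <;> simp [h]
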